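-- pv_equiv track=rewrite | github.com/von-moyo/dsa | clients.py | lastAssignedLocker
-- ===== SOURCE A (Python) =====
-- from typing import List
-- import heapq
--
-- def lastAssignedLocker(clients: List[str]) -> int:
--     lockerMap = {}
--     availableLockers = []
--     lastAssignedLocker = -1
--     for i in range(1, len(clients) + 1):
--         heapq.heappush(availableLockers, i)
--     for client in clients:
--         if client in lockerMap:
--             locker = lockerMap[client]
--             del lockerMap[client]
--             heapq.heappush(availableLockers, locker)
--         else:
--             locker = heapq.heappop(availableLockers)
--             lockerMap[client] = locker
--             lastAssignedLocker = locker  # Update last assigned locker regardless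
--
--     return lastAssignedLocker
-- ===== SOURCE B (Python) =====
-- def lastAssignedLocker(clients):
--     lockerMap = {}
--     occupied = set()
--     last = -1
--     for client in clients:
--         if client in lockerMap:
--             occupied.discard(lockerMap.pop(client))
--         else:
--             k = 1
--             while k in occupied:
--                 k += 1
--             occupied.add(k)
--             lockerMap[client] = k
--             last = k
--     return last
-- ===== Notes on version B (the rewrite author's own statement) =====
-- stated objective: simpler
-- what changed: Drops the pre-built free-locker heap entirely: B tracks only the set of occupied lockers and, on each check-in, assigns the smallest positive integer not occupied (a mex scan k=1,2,...), which equals the heap's minimum free locker.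
import Mathlib
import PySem

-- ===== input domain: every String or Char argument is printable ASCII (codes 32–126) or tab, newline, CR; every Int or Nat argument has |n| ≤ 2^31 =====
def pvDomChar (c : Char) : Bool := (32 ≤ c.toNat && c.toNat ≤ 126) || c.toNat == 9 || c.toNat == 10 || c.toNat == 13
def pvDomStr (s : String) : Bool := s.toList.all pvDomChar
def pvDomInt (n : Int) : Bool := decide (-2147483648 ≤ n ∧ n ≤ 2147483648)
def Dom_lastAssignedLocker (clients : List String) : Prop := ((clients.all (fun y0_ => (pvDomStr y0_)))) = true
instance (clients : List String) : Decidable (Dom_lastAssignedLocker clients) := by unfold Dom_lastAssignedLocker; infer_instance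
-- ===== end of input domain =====

-- B drops A's pre-built free-locker heap: it tracks only the occupied lockers and assigns the
-- smallest positive integer not occupied (a mex scan) on each check-in (simpler, not faster).

-- ===== PORT A =====
-- The heapq min-heap is modelled as a sorted list: heappush = ordered insert, heappop = take the
-- head (the minimum) — exact, since the heap is only observed through heappop's min-first order.
-- `heap.head?.getD 0` : heappop of an empty heap would raise IndexError; the proof shows the heap
-- is never empty at a pop, so the default 0 is unreachable. `getD client 0` : lockerMap[client]
-- with the key present (guarded by the branch), so the default is unreachable too.
def pvStepA (st : PySem.Dict String Int × List Int × Int) (client : String) :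
    PySem.Dict String Int × List Int × Int :=
  if st.1.contains client then
    (st.1.erase client, List.orderedInsert (· ≤ ·) (st.1.getD client 0) st.2.1, st.2.2)
  else
    (st.1.insert client (st.2.1.head?.getD 0), st.2.1.tail, st.2.1.head?.getD 0)

def lastAssignedLocker (clients : List String) : Int :=
  let availableLockers : List Int :=
    (PySem.List.pyRange 1 ((clients.length : Int) + 1) 1).foldl
      (fun h i => List.orderedInsert (· ≤ ·) i h) []
  (clients.foldl pvStepA (PySem.Dict.empty, availableLockers, -1)).2.2

-- ===== PORT B =====
-- The `while k in occupied: k += 1` loop, ported with fuel `occupied.length + 1`: the loop body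
-- can run at most `occupied.length` times (each passed k is a distinct member of occupied), so
-- the fuel only makes the same computation total and is never exhausted.
def pvMexAux (occ : PySem.Set Int) (fuel : Nat) (k : Int) : Int :=
  match fuel with
  | 0 => k
  | n + 1 => if k ∈ occ then pvMexAux occ n (k + 1) else k

def pvStepB (st : PySem.Dict String Int × PySem.Set Int × Int) (client : String) :
    PySem.Dict String Int × PySem.Set Int × Int :=
  if st.1.contains client then
    (st.1.erase client, PySem.Set.discard st.2.1 (st.1.getD client 0), st.2.2)
  else
    (st.1.insert client (pvMexAux st.2.1 (st.2.1.length + 1) 1),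
     PySem.Set.add st.2.1 (pvMexAux st.2.1 (st.2.1.length + 1) 1),
     pvMexAux st.2.1 (st.2.1.length + 1) 1)

def lastAssignedLocker_alt (clients : List String) : Int :=
  (clients.foldl pvStepB (PySem.Dict.empty, PySem.Set.ofList [], -1)).2.2

-- ===== PRECONDITION & SPEC =====
def Spec_lastAssignedLocker (clients : List String) (out : Int) : Prop := out = lastAssignedLocker_alt clients
instance (clients : List String) (out : Int) : Decidable (Spec_lastAssignedLocker clients out) := by unfold Spec_lastAssignedLocker; infer_instance

-- ===== CLAIM (what is proved, stated in full; the proofs are below) =====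
def Claim_equal_lastAssignedLocker : Prop := ∀ (clients : List String), Dom_lastAssignedLocker clients → Spec_lastAssignedLocker clients (lastAssignedLocker clients)

-- ===== LEMMAS AND PROOFS =====

-- The full locker range 1..N.
def pvR (N : Nat) : List Int := PySem.List.pyRange 1 ((N : Int) + 1) 1

lemma pvR_zero : pvR 0 = [] := by decide

lemma pvR_succ (N : Nat) : pvR (N + 1) = pvR N ++ [(N : Int) + 1] := by
  unfold pvR
  push_cast
  exact PySem.List.pyRange_one_succ_right (by omega)

lemma pvR_nodup (N : Nat) : (pvR N).Nodup := by
  induction N with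
  | zero => simp [pvR_zero]
  | succ n ih =>
    rw [pvR_succ]
    refine List.Nodup.append ih (by simp) ?_
    intro a ha hb
    simp at hb
    subst hb
    have := (PySem.List.mem_pyRange_one).mp ha
    omega

lemma pvR_length (N : Nat) : (pvR N).length = N := by
  induction N with
  | zero => simp [pvR_zero]
  | succ n ih => rw [pvR_succ]; simp [ih]

lemma pvR_mem (N : Nat) (x : Int) : x ∈ pvR N ↔ 1 ≤ x ∧ x ≤ N := by
  unfold pvR
  rw [PySem.List.mem_pyRange_one]
  omega

-- building the initial heap by repeated ordered insertion
lemma pvBuild_sorted_perm : ∀ (l acc : List Int), acc.Pairwise (· ≤ ·) →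
    (l.foldl (fun h i => List.orderedInsert (· ≤ ·) i h) acc).Pairwise (· ≤ ·) ∧
    (l.foldl (fun h i => List.orderedInsert (· ≤ ·) i h) acc).Perm (acc ++ l) := by
  intro l
  induction l with
  | nil => intro acc hacc; simpa using hacc
  | cons x l ih =>
    intro acc hacc
    simp only [List.foldl_cons]
    obtain ⟨hs, hp⟩ := ih (List.orderedInsert (· ≤ ·) x acc) (List.Pairwise.orderedInsert x acc hacc)
    refine ⟨hs, hp.trans ?_⟩
    have h1 : (List.orderedInsert (· ≤ ·) x acc ++ l).Perm ((x :: acc) ++ l) :=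
      (List.perm_orderedInsert _ x acc).append_right l
    exact h1.trans List.perm_middle.symm

-- deleting a present key from an association list with distinct keys
lemma pvFilter_perm : ∀ (its : List (String × Int)) (c : String) (v : Int),
    (its.map (fun p => p.1)).Nodup → (c, v) ∈ its →
    its.Perm ((c, v) :: its.filter (fun p => !(p.1 == c))) := by
  intro its
  induction its with
  | nil => intro c v _ hm; simp at hm
  | cons p rest ih =>
    intro c v hnd hm
    have hnd' : (rest.map (fun p => p.1)).Nodup := (List.nodup_cons.mp (by simpa using hnd)).2
    have hp1 : p.1 ∉ rest.map (fun p => p.1) := (List.nodup_cons.mp (by simpa using hnd)).1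
    rcases List.mem_cons.mp hm with hm | hm
    · have hpe : p = (c, v) := hm.symm
      subst hpe
      have hall : ∀ q ∈ rest, (fun p => !(p.1 == c)) q = true := by
        intro q hq
        have : q.1 ∈ rest.map (fun p => p.1) := List.mem_map.mpr ⟨q, hq, rfl⟩
        simp only [Bool.not_eq_eq_eq_not, Bool.not_true, beq_eq_false_iff_ne, ne_eq]
        intro he; exact hp1 (he ▸ this)
      rw [List.filter_cons_of_neg (by simp), List.filter_eq_self.mpr hall]
    · have hpc : p.1 ≠ c := by
        intro he
        exact hp1 (he ▸ List.mem_map.mpr ⟨(c, v), hm, rfl⟩)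
      rw [List.filter_cons_of_pos (by simp [hpc])]
      exact ((ih c v hnd' hm).cons p).trans (List.Perm.swap _ _ _)

lemma pvNodup_length_le {α : Type} [DecidableEq α] (l l' : List α) (h : l.Nodup) (s : l ⊆ l') :
    l.length ≤ l'.length :=
  calc l.length = l.toFinset.card := (List.toFinset_card_of_nodup h).symm
    _ ≤ l'.toFinset.card := Finset.card_le_card (fun a ha => by
        simp only [List.mem_toFinset] at ha ⊢; exact s ha)
    _ ≤ l'.length := List.toFinset_card_le l'

-- the mex scan reaches x when everything from k up to x is occupied, x is free, and fuel suffices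
lemma pvMexAux_eq (occ : PySem.Set Int) (x : Int) : ∀ (fuel : Nat) (k : Int), k ≤ x →
    (∀ j : Int, k ≤ j → j < x → j ∈ occ) → x ∉ occ → (x - k).toNat < fuel →
    pvMexAux occ fuel k = x := by
  intro fuel
  induction fuel with
  | zero => intro k _ _ _ hf; omega
  | succ n ih =>
    intro k hkx hocc hx hf
    unfold pvMexAux
    by_cases hk : k = x
    · subst hk
      simp [hx]
    · have hklt : k < x := lt_of_le_of_ne hkx hk
      have hkin : k ∈ occ := hocc k le_rfl hklt
      simp only [hkin, if_true]
      exact ih (k + 1) (by omega) (fun j hj hjx => hocc j (by omega) hjx) hx (by omega)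

-- the loop invariant: shared map and last locker, A's heap a sorted list, B's occupied set a
-- permutation of the map's values, heap + occupied a permutation of 1..N, keys distinct and
-- drawn from the client list
lemma pvLoop (all : List String) :
    ∀ (cs : List String) (m : PySem.Dict String Int) (h : List Int) (occ : PySem.Set Int) (last : Int),
    (∀ c ∈ cs, c ∈ all) →
    h.Pairwise (· ≤ ·) → occ.Perm m.values →
    (h ++ occ).Perm (pvR all.length) → m.keys.Nodup → (∀ k ∈ m.keys, k ∈ all) →
    (cs.foldl pvStepA (m, h, last)).2.2 = (cs.foldl pvStepB (m, occ, last)).2.2 := by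
  intro cs
  induction cs with
  | nil => intros; rfl
  | cons c cs ih =>
    intro m h occ last hall hsort hov hR hnd hkeys
    have hall' : ∀ x ∈ cs, x ∈ all := fun x hx => hall x (List.mem_cons_of_mem c hx)
    have hhvnd : (h ++ occ).Nodup := hR.symm.nodup (pvR_nodup all.length)
    have hoccnd : occ.Nodup := (List.nodup_append.mp hhvnd).2.1
    simp only [List.foldl_cons]
    by_cases hc : m.contains c = true
    · -- check-out: the client holds a locker; it leaves the occupied set / returns to the heap
      obtain ⟨v, hv⟩ : ∃ v, m.get? c = some v := by
        have hiso := PySem.Dict.contains_eq_isSome_get? m c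
        rw [hc] at hiso
        exact Option.isSome_iff_exists.mp hiso.symm
      have hgetD : m.getD c 0 = v := PySem.Dict.getD_of_get?_eq_some m 0 hv
      have hmemit : (c, v) ∈ m.items := PySem.Dict.mem_items_of_get?_eq_some m hv
      have hitems : m.items.Perm ((c, v) :: (m.erase c).items) := by
        have : (m.erase c).items = m.items.filter (fun p => !(p.1 == c)) := rfl
        rw [this]
        exact pvFilter_perm m.items c v (by simpa [PySem.Dict.keys] using hnd) hmemit
      have hvals : m.values.Perm (v :: (m.erase c).values) := by
        simpa [PySem.Dict.values] using hitems.map (fun p => p.2)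
      have hvocc : v ∈ occ := hov.mem_iff.mpr (List.mem_map.mpr ⟨(c, v), hmemit, rfl⟩)
      have hdisc : PySem.Set.discard occ v = occ.erase v := by
        rw [hoccnd.erase_eq_filter v]
        rfl
      have hov' : (occ.erase v).Perm ((m.erase c).values) := by
        have := (hov.trans hvals).erase v
        simpa using this
      have hsort' : (List.orderedInsert (· ≤ ·) v h).Pairwise (· ≤ ·) :=
        List.Pairwise.orderedInsert v h hsort
      have hR' : (List.orderedInsert (· ≤ ·) v h ++ occ.erase v).Perm (pvR all.length) := by
      -- orderedInsert v h ++ occ.erase v ~ v :: h ++ occ.erase v ~ h ++ v :: occ.erase v ~ h ++ occ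
        have e1 : (List.orderedInsert (· ≤ ·) v h ++ occ.erase v).Perm
            ((v :: h) ++ occ.erase v) := (List.perm_orderedInsert _ v h).append_right _
        have e2 : ((v :: h) ++ occ.erase v).Perm (h ++ v :: occ.erase v) := List.perm_middle.symm
        have e3 : (h ++ v :: occ.erase v).Perm (h ++ occ) :=
          ((List.perm_cons_erase hvocc).symm).append_left h
        exact ((e1.trans e2).trans e3).trans hR
      have hsubkeys : ((m.erase c).keys).Sublist m.keys := by
        have : (m.erase c).keys = (m.items.filter (fun p => !(p.1 == c))).map (fun p => p.1) := rfl
        rw [this]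
        exact (List.filter_sublist).map _
      have hnd' : (m.erase c).keys.Nodup := hnd.sublist hsubkeys
      have hkeys' : ∀ k ∈ (m.erase c).keys, k ∈ all := fun k hk => hkeys k (hsubkeys.subset hk)
      simp only [pvStepA, pvStepB, hc, if_true, hgetD, hdisc]
      exact ih (m.erase c) _ _ last hall' hsort' hov' hR' hnd' hkeys'
    · -- check-in: A pops the heap's minimum x; B's mex scan finds the same x
      have hc0 : m.contains c = false := by simpa using hc
      have hcm : c ∉ m.keys := fun hx => hc ((PySem.Dict.contains_iff_mem_keys m c).mpr hx)
      have hnd2 : (c :: m.keys).Nodup := List.nodup_cons.mpr ⟨hcm, hnd⟩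
      have hsub2 : (c :: m.keys) ⊆ all := by
        intro k hk
        rcases List.mem_cons.mp hk with hk | hk
        · exact hk ▸ hall c List.mem_cons_self
        · exact hkeys k hk
      have hcount : m.keys.length + 1 ≤ all.length := by
        simpa using pvNodup_length_le _ _ hnd2 hsub2
      have hvlen : m.values.length = m.keys.length := by
        simp [PySem.Dict.values, PySem.Dict.keys]
      have hlenh : h.length + occ.length = all.length := by
        have := hR.length_eq
        simpa [pvR_length] using this
      have holen : occ.length = m.keys.length := hov.length_eq.trans hvlen
      obtain ⟨x, t, hxt⟩ : ∃ x t, h = x :: t := by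
        cases h with
        | nil => exfalso; simp at hlenh; omega
        | cons a b => exact ⟨a, b, rfl⟩
      subst hxt
      -- x is the minimum free locker: everything below it is occupied, x itself is not
      have hxR : x ∈ pvR all.length := hR.subset (List.mem_append.mpr (Or.inl List.mem_cons_self))
      have hx1 : 1 ≤ x := ((pvR_mem _ x).mp hxR).1
      have hxnocc : x ∉ occ :=
        fun hx => (List.disjoint_of_nodup_append hhvnd) List.mem_cons_self hx
      have hbelow : ∀ j : Int, 1 ≤ j → j < x → j ∈ occ := by
        intro j hj1 hjx
        have hjR : j ∈ pvR all.length := (pvR_mem _ j).mpr ⟨hj1, by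
          have := ((pvR_mem _ x).mp hxR).2; omega⟩
        rcases List.mem_append.mp (hR.symm.subset hjR) with hjh | hjo
        · exfalso
          rcases List.mem_cons.mp hjh with hje | hjt
          · omega
          · have := (List.pairwise_cons.mp hsort).1 j hjt
            omega
        · exact hjo
      have hfuel : (x - 1).toNat < occ.length + 1 := by
        have hsub : PySem.List.pyRange 1 x 1 ⊆ occ := by
          intro j hj
          have := PySem.List.mem_pyRange_one.mp hj
          exact hbelow j this.1 this.2
        have := pvNodup_length_le _ _ (PySem.List.nodup_pyRange_one 1 x) hsub
        rw [PySem.List.length_pyRange_one] at this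
        omega
      have hmex : pvMexAux occ (occ.length + 1) 1 = x :=
        pvMexAux_eq occ x (occ.length + 1) 1 hx1 (fun j hj hjx => hbelow j hj hjx) hxnocc hfuel
      have hadd : PySem.Set.add occ x = occ ++ [x] := by
        simp [PySem.Set.add, hxnocc]
      have hsort' : t.Pairwise (· ≤ ·) := (List.pairwise_cons.mp hsort).2
      have hvals' : (m.insert c x).values = m.values ++ [x] := by
        simp [PySem.Dict.values, PySem.Dict.items_insert_of_not_contains m x hc0]
      have hov' : (occ ++ [x]).Perm ((m.insert c x).values) := by
        rw [hvals']
        exact hov.append_right [x]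
      have hR' : (t ++ (occ ++ [x])).Perm (pvR all.length) := by
        have e1 : (t ++ (occ ++ [x])).Perm ((t ++ occ) ++ [x]) := by
          rw [List.append_assoc]
        have e2 : ((t ++ occ) ++ [x]).Perm (x :: (t ++ occ)) := List.perm_append_singleton _ _
        exact (e1.trans e2).trans hR
      have hnd'' : (m.insert c x).keys.Nodup := PySem.Dict.nodup_keys_insert m c x hnd
      have hkeys'' : ∀ k ∈ (m.insert c x).keys, k ∈ all := by
        intro k hk
        rw [PySem.Dict.keys_insert_of_not_contains m x hc0] at hk
        rcases List.mem_append.mp hk with hk | hk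
        · exact hkeys k hk
        · simp at hk; exact hk ▸ hall c List.mem_cons_self
      simp only [pvStepA, pvStepB, hc0, Bool.false_eq_true, if_false, hmex,
        List.head?_cons, Option.getD_some, List.tail_cons, hadd]
      exact ih (m.insert c x) t (occ ++ [x]) x hall' hsort' hov' hR' hnd'' hkeys''

-- ===== VERDICT (by name: the statement is the Claim_ definition above) =====
theorem lastAssignedLocker_spec : Claim_equal_lastAssignedLocker := by
  intro clients _
  unfold Spec_lastAssignedLocker lastAssignedLocker lastAssignedLocker_alt
  obtain ⟨hs, hp⟩ := pvBuild_sorted_perm (pvR clients.length) [] List.Pairwise.nil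
  have hR0 : (((pvR clients.length).foldl (fun h i => List.orderedInsert (· ≤ ·) i h) []) ++
      (PySem.Set.ofList [] : PySem.Set Int)).Perm (pvR clients.length) := by
    simpa [PySem.Set.ofList] using hp
  exact pvLoop clients clients PySem.Dict.empty _ _ (-1) (fun c hc => hc) hs
    (by simp [PySem.Set.ofList, PySem.Dict.values, PySem.Dict.empty]) hR0
    (by simp [PySem.Dict.keys, PySem.Dict.empty]) (by simp [PySem.Dict.keys, PySem.Dict.empty])
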